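-- pv_equiv track=rewrite | github.com/Quake28/old_code_snippets | python/random/perfect_cube.py | perfect_Three
-- ===== SOURCE A (Python) =====
-- def perfect_Three(d):
--     x=100
--     for a in range(1,x):
--         for b in range(a+1,x):
--             for c in range(b+1,x):
--                 if a!=b and a!=c:
--                     if d**3==(a**3 + b**3 + c**3):
--                         return True
--     return False
-- ===== SOURCE B (Python) =====
-- def perfect_Three(d):
--     x = 100
--     cubes = {c**3 for c in range(1, x)}
--     t = d**3
--     for a in range(1, x):
--         for b in range(a + 1, x):
--             rem = t - a**3 - b**3
--             if rem > b**3 and rem in cubes: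
--                 return True
--     return False
-- ===== Notes on version B (the rewrite author's own statement) =====
-- stated objective: faster
-- what changed: Replaced the innermost loop over c by a single membership test of the remainder in a precomputed set of cubes (with rem > b^3 enforcing b < c < bound), reducing the constant-size search from cubic to quadratic in the fixed bound x.
import Mathlib
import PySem

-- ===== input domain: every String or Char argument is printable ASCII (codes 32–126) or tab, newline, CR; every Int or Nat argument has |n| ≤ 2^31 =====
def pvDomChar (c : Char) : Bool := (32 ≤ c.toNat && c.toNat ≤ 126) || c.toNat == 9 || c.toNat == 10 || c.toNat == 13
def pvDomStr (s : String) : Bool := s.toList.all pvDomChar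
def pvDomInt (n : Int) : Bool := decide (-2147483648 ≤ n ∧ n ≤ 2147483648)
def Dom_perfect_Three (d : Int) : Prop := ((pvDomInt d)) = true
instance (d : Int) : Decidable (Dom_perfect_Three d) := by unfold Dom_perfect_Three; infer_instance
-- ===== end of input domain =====

-- B replaces A's innermost scan for c by one membership test in a precomputed cube set (constant-factor speed-up, x^2 vs x^3 iterations).

-- ===== PORT A =====
-- A: triple nested loop over 1≤a<b<c<100 with early return ≡ nested List.any
def perfect_Three (d : Int) : Bool :=
  (PySem.List.pyRange 1 100 1).any (fun a =>
    (PySem.List.pyRange (a + 1) 100 1).any (fun b =>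
      (PySem.List.pyRange (b + 1) 100 1).any (fun c =>
        (decide (a ≠ b) && decide (a ≠ c)) &&
          decide (d ^ 3 = a ^ 3 + b ^ 3 + c ^ 3))))

-- ===== PORT B =====
-- B: cube set precomputed once; double loop with a membership test for the third cube
def perfect_Three_alt (d : Int) : Bool :=
  let cubes : PySem.Set Int := PySem.Set.ofList ((PySem.List.pyRange 1 100 1).map (fun c => c ^ 3))
  let t := d ^ 3
  (PySem.List.pyRange 1 100 1).any (fun a =>
    (PySem.List.pyRange (a + 1) 100 1).any (fun b =>
      let rem := t - a ^ 3 - b ^ 3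
      decide (rem > b ^ 3) && PySem.Set.contains cubes rem))

-- ===== PRECONDITION & SPEC =====
def Spec_perfect_Three (d : Int) (out : Bool) : Prop := out = perfect_Three_alt d
instance (d : Int) (out : Bool) : Decidable (Spec_perfect_Three d out) := by unfold Spec_perfect_Three; infer_instance

-- ===== CLAIM (what is proved, stated in full; the proofs are below) =====
def Claim_equal_perfect_Three : Prop := ∀ (d : Int), Dom_perfect_Three d → Spec_perfect_Three d (perfect_Three d)

-- ===== LEMMAS AND PROOFS =====

theorem cube_lt_cube (x y : Int) : x ^ 3 < y ^ 3 ↔ x < y := by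
  constructor
  · intro h
    by_contra hle
    push Not at hle
    nlinarith [sq_nonneg (x + y), sq_nonneg (x - y), sq_nonneg x, sq_nonneg y]
  · intro h
    nlinarith [sq_nonneg (x + y), sq_nonneg (x - y), sq_nonneg x, sq_nonneg y]

-- inner equivalence for fixed a < b
theorem inner_eq (d a b : Int) (hab : a < b) (hb1 : 1 ≤ b) :
    ((PySem.List.pyRange (b + 1) 100 1).any (fun c =>
        (decide (a ≠ b) && decide (a ≠ c)) &&
          decide (d ^ 3 = a ^ 3 + b ^ 3 + c ^ 3)))
      = (decide (d ^ 3 - a ^ 3 - b ^ 3 > b ^ 3) &&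
          PySem.Set.contains
            (PySem.Set.ofList ((PySem.List.pyRange 1 100 1).map (fun c => c ^ 3)))
            (d ^ 3 - a ^ 3 - b ^ 3)) := by
  rw [Bool.eq_iff_iff]
  simp only [List.any_eq_true, Bool.and_eq_true, decide_eq_true_eq,
    PySem.Set.contains, PySem.Set.mem_ofList, List.mem_map,
    PySem.List.mem_pyRange_one, List.elem_iff]
  constructor
  · rintro ⟨c, ⟨hbc, hc100⟩, ⟨-, hac⟩, heq⟩
    refine ⟨?_, c, ⟨by omega, hc100⟩, by omega⟩
    have : b ^ 3 < c ^ 3 := (cube_lt_cube b c).mpr (by omega)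
    omega
  · rintro ⟨hgt, c, ⟨hc1, hc100⟩, hrem⟩
    have hbc : b < c := (cube_lt_cube b c).mp (by omega)
    exact ⟨c, ⟨by omega, hc100⟩, ⟨by omega, by omega⟩, by omega⟩

-- ===== VERDICT (by name: the statement is the Claim_ definition above) =====
theorem perfect_Three_spec : Claim_equal_perfect_Three := by
  intro d _
  unfold Spec_perfect_Three perfect_Three perfect_Three_alt
  rw [Bool.eq_iff_iff]
  simp only [List.any_eq_true]
  constructor
  · rintro ⟨a, ha, b, hb, h⟩
    have ha' := (PySem.List.mem_pyRange_one).mp ha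
    have hb' := (PySem.List.mem_pyRange_one).mp hb
    refine ⟨a, ha, b, hb, ?_⟩
    rw [← List.any_eq_true] at h
    rw [inner_eq d a b (by omega) (by omega)] at h
    exact h
  · rintro ⟨a, ha, b, hb, h⟩
    have ha' := (PySem.List.mem_pyRange_one).mp ha
    have hb' := (PySem.List.mem_pyRange_one).mp hb
    refine ⟨a, ha, b, hb, ?_⟩
    rw [← List.any_eq_true, inner_eq d a b (by omega) (by omega)]
    exact h
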